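-- pv_equiv track=rewrite | github.com/guochangjiang/Python.learn | Biopython/my.biopython/draw.tree.by.nwk/newick.explore.v1.1.py | GetMinClade
-- ===== SOURCE A (Python) =====
-- def GetMinClade(info):
--     fbindex = []
--     rbindex = []
--     data2return = []
--     index = 0
--     while index < len(info):
--         if info[index] == "(":
--             fbindex.append(index)
--         if info[index] == ")":
--             rbindex.append(index)
--         index += 1
--     index1 = 0
--     while index1 < len(fbindex):
--             index2 = 0
--             while index2 < len(rbindex):
--                 if fbindex[index1]< rbindex[index2]:
--                     data = info[fbindex[index1]+1:rbindex[index2]]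
--                     if ")" not in data and "(" not in data:
--                         data2return.append(data)
--                 index2 += 1
--             index1 += 1
--     return data2return
-- ===== SOURCE B (Python) =====
-- def GetMinClade(info):
--     out = []
--     open_pos = -1
--     for i, c in enumerate(info):
--         if c == '(':
--             open_pos = i
--         elif c == ')':
--             if open_pos >= 0:
--                 out.append(info[open_pos + 1:i])
--             open_pos = -1
--     return out
-- ===== Notes on version B (the rewrite author's own statement) =====
-- stated objective: faster
-- what changed: Replaced the two index-collection passes plus the nested loop over all opening/closing bracket index pairs (each testing a substring for brackets) by a single left-to-right scan that remembers the position of the last opening bracket and emits the enclosed substring when a closing bracket directly follows it.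
import Mathlib
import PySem

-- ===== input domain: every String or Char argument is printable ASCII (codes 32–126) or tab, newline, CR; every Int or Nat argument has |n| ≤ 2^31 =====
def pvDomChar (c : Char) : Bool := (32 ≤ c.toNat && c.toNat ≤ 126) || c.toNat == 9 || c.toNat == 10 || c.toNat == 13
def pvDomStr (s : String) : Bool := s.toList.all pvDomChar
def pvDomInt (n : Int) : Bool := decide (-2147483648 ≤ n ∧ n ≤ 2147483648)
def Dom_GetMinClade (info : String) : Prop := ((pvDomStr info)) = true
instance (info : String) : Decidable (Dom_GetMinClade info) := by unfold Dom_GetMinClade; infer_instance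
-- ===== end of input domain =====

-- B replaces A's nested loop over all '('×')' index pairs (each with a substring scan) by one
-- left-to-right scan remembering the last '(' position; a timing run measures the speed-up.

-- ===== PORT A =====
def GetMinClade (info : String) : List String :=
  let scan := (PySem.List.enumerate info.toList 0).foldl
    (fun (st : List Int × List Int) (p : Int × Char) =>
      let st1 := if p.2 = '(' then (st.1 ++ [p.1], st.2) else st
      if p.2 = ')' then (st1.1, st1.2 ++ [p.1]) else st1)
    ([], [])
  let fbindex := scan.1
  let rbindex := scan.2
  fbindex.foldl (fun acc f =>
    rbindex.foldl (fun acc2 r =>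
      if f < r then
        let data := PySem.Str.slice info (some (f + 1)) (some r)
        if PySem.Str.isIn ")" data = false ∧ PySem.Str.isIn "(" data = false
        then acc2 ++ [data] else acc2
      else acc2) acc) []

-- ===== PORT B =====
def GetMinClade_alt (info : String) : List String :=
  ((PySem.List.enumerate info.toList 0).foldl
    (fun (st : List String × Int) (p : Int × Char) =>
      if p.2 = '(' then (st.1, p.1)
      else if p.2 = ')' then
        ((if 0 ≤ st.2 then st.1 ++ [PySem.Str.slice info (some (st.2 + 1)) (some p.1)] else st.1), -1)
      else st)
    ([], -1)).1

-- ===== PRECONDITION & SPEC =====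
def Spec_GetMinClade (info : String) (out : List String) : Prop := out = GetMinClade_alt info
instance (info : String) (out : List String) : Decidable (Spec_GetMinClade info out) := by unfold Spec_GetMinClade; infer_instance

-- ===== CLAIM (what is proved, stated in full; the proofs are below) =====
def Claim_equal_GetMinClade : Prop := ∀ (info : String), Dom_GetMinClade info → Spec_GetMinClade info (GetMinClade info)

-- ===== LEMMAS AND PROOFS =====

/-- The substring both programs emit for a '(' at `f` and a ')' at `r`. -/
def pvEmit (info : String) (f r : Int) : String :=
  PySem.Str.slice info (some (f + 1)) (some r)

def pvEn (info : String) : List (Int × Char) := PySem.List.enumerate info.toList 0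
def pvFb (info : String) : List Int := ((pvEn info).filter (fun p => decide (p.2 = '('))).map Prod.fst
def pvRb (info : String) : List Int := ((pvEn info).filter (fun p => decide (p.2 = ')'))).map Prod.fst

/-- B's scan as a structural recursion: `op` is the pending '(' position (or -1). -/
def pvAdjFrom (info : String) (op : Int) : List (Int × Char) → List String
  | [] => []
  | p :: rest =>
    if p.2 = '(' then pvAdjFrom info p.1 rest
    else if p.2 = ')' then
      (if 0 ≤ op then [pvEmit info op p.1] else []) ++ pvAdjFrom info (-1) rest
    else pvAdjFrom info op rest

/-- "no parenthesis of `l` lies strictly between `f` and `r`" (abbrev so `Decidable` unfolds). -/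
abbrev pvNoB (l : List (Int × Char)) (f r : Int) : Prop :=
  ∀ q ∈ l, (q.2 = '(' ∨ q.2 = ')') → ¬(f < q.1 ∧ q.1 < r)

/-- A's inner loop for the '(' at `f`, in index form. -/
def pvNb (info : String) (l : List (Int × Char)) (f : Int) : List String :=
  (l.filter (fun r => decide (r.2 = ')' ∧ f < r.1 ∧ pvNoB l f r.1))).map (fun r => pvEmit info f r.1)

lemma pvB_fold (info : String) (l : List (Int × Char)) :
    ∀ (acc : List String) (op : Int),
      (l.foldl
        (fun (st : List String × Int) (p : Int × Char) =>
          if p.2 = '(' then (st.1, p.1)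
          else if p.2 = ')' then
            ((if 0 ≤ st.2 then st.1 ++ [PySem.Str.slice info (some (st.2 + 1)) (some p.1)] else st.1), -1)
          else st)
        (acc, op)).1 = acc ++ pvAdjFrom info op l := by
  induction l with
  | nil => intro acc op; simp [pvAdjFrom]
  | cons p rest ih =>
    intro acc op
    rw [List.foldl_cons]
    by_cases h1 : p.2 = '('
    · have h2 : ¬ p.2 = ')' := by rw [h1]; decide
      simp only [if_pos h1]
      rw [ih, pvAdjFrom, if_pos h1]
    · by_cases h2 : p.2 = ')'
      · simp only [if_neg h1, if_pos h2]
        rw [pvAdjFrom, if_neg h1, if_pos h2]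
        by_cases h3 : 0 ≤ op
        · rw [if_pos h3, if_pos h3, ih, List.append_assoc]
          rfl
        · rw [if_neg h3, if_neg h3, ih, List.nil_append]
      · simp only [if_neg h1, if_neg h2]
        rw [ih, pvAdjFrom, if_neg h1, if_neg h2]

lemma pvFlatMap_filter {α β : Type} (l : List α) (p : α → Bool) (g : α → List β) :
    (l.filter p).flatMap g = l.flatMap (fun x => if p x then g x else []) := by
  induction l with
  | nil => rfl
  | cons a t ih => by_cases h : p a <;> simp [List.filter_cons, h, ih]

lemma pvNb_filter_congr (info : String) (h : Int × Char) (t : List (Int × Char)) (g : Int)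
    (hq : (h.2 = '(' ∨ h.2 = ')') → ¬(g < h.1)) :
    (t.filter (fun r => decide (r.2 = ')' ∧ g < r.1 ∧ pvNoB (h :: t) g r.1))) =
    (t.filter (fun r => decide (r.2 = ')' ∧ g < r.1 ∧ pvNoB t g r.1))) := by
  apply List.filter_congr
  intro r _hr
  simp only [decide_eq_decide]
  constructor
  · rintro ⟨a1, a2, a3⟩
    exact ⟨a1, a2, fun q hqm => a3 q (List.mem_cons_of_mem _ hqm)⟩
  · rintro ⟨a1, a2, a3⟩
    refine ⟨a1, a2, fun q hqm => ?_⟩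
    rcases List.mem_cons.mp hqm with rfl | hqm
    · intro hp hcon; exact hq hp hcon.1
    · exact a3 q hqm

lemma pvNb_cons_skip (info : String) (h : Int × Char) (t : List (Int × Char)) (g : Int)
    (hg : h.1 ≤ g) : pvNb info (h :: t) g = pvNb info t g := by
  unfold pvNb
  rw [List.filter_cons, if_neg (by simp; omega)]
  rw [pvNb_filter_congr info h t g (fun _ => by omega)]

lemma pvNb_cons_other (info : String) (h : Int × Char) (t : List (Int × Char)) (g : Int)
    (hh : ¬(h.2 = '(' ∨ h.2 = ')')) : pvNb info (h :: t) g = pvNb info t g := by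
  unfold pvNb
  rw [List.filter_cons, if_neg (by simp_all)]
  rw [pvNb_filter_congr info h t g (fun hp => absurd hp hh)]

lemma pvNb_cons_open (info : String) (h : Int × Char) (t : List (Int × Char)) (i : Int)
    (hh : h.2 = '(') (hlt : ∀ p ∈ t, h.1 < p.1) (hi : i < h.1) :
    pvNb info (h :: t) i = [] := by
  unfold pvNb
  rw [List.filter_cons, if_neg (by simp [hh])]
  rw [List.filter_eq_nil_iff.mpr, List.map_nil]
  intro r hr
  simp only [decide_eq_true_eq, not_and]
  intro _ _ hnob
  exact hnob h List.mem_cons_self (Or.inl hh) ⟨hi, hlt r hr⟩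

lemma pvNb_cons_close (info : String) (h : Int × Char) (t : List (Int × Char)) (i : Int)
    (hh : h.2 = ')') (hlt : ∀ p ∈ t, h.1 < p.1) (hi : i < h.1) :
    pvNb info (h :: t) i = [pvEmit info i h.1] := by
  unfold pvNb
  rw [List.filter_cons, if_pos]
  · rw [List.filter_eq_nil_iff.mpr, List.map_cons, List.map_nil]
    intro r hr
    simp only [decide_eq_true_eq, not_and]
    intro _ _ hnob
    exact hnob h List.mem_cons_self (Or.inr hh) ⟨hi, hlt r hr⟩
  · simp only [decide_eq_true_eq]
    refine ⟨hh, hi, fun q hqm hp => ?_⟩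
    rcases List.mem_cons.mp hqm with rfl | hqm
    · omega
    · have := hlt q hqm; omega

/-- Main lemma: A's pair-enumeration formula equals B's scan, over any
    strictly increasing nonnegative index list. -/
lemma pvG (info : String) (l : List (Int × Char))
    (hpw : l.Pairwise (fun a b => a.1 < b.1)) (hnn : ∀ p ∈ l, 0 ≤ p.1) :
    ∀ i : Int, (∀ p ∈ l, i < p.1) →
      (if 0 ≤ i then pvNb info l i else []) ++
        l.flatMap (fun h => if h.2 = '(' then pvNb info l h.1 else []) = pvAdjFrom info i l := by
  induction l with
  | nil => intro i _; simp [pvAdjFrom, pvNb]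
  | cons h t ih =>
    have hpw' := (List.pairwise_cons.mp hpw).2
    have hlt : ∀ p ∈ t, h.1 < p.1 := (List.pairwise_cons.mp hpw).1
    have hnn' : ∀ p ∈ t, 0 ≤ p.1 := fun p hp => hnn p (List.mem_cons_of_mem _ hp)
    intro i hi
    have hih := ih hpw' hnn'
    have hi0 : i < h.1 := hi h List.mem_cons_self
    by_cases h1 : h.2 = '('
    · have h2 : ¬ h.2 = ')' := by rw [h1]; decide
      have hrw : ∀ p ∈ t, (if p.2 = '(' then pvNb info (h :: t) p.1 else []) =
          (if p.2 = '(' then pvNb info t p.1 else []) := fun p hp => by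
        rw [pvNb_cons_skip info h t p.1 (le_of_lt (hlt p hp))]
      rw [List.flatMap_cons, List.flatMap_congr hrw]
      rw [pvAdjFrom, if_pos h1, ← hih h.1 hlt, if_pos (hnn h List.mem_cons_self)]
      rw [if_pos h1, pvNb_cons_skip info h t h.1 le_rfl]
      by_cases h3 : 0 ≤ i
      · rw [if_pos h3, pvNb_cons_open info h t i h1 hlt hi0, List.nil_append]
      · rw [if_neg h3, List.nil_append]
    · by_cases h2 : h.2 = ')'
      · have hrw : ∀ p ∈ t, (if p.2 = '(' then pvNb info (h :: t) p.1 else []) =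
            (if p.2 = '(' then pvNb info t p.1 else []) := fun p hp => by
          rw [pvNb_cons_skip info h t p.1 (le_of_lt (hlt p hp))]
        rw [List.flatMap_cons, List.flatMap_congr hrw]
        rw [pvAdjFrom, if_neg h1, if_pos h2]
        rw [← hih (-1) (fun p hp => by have := hnn' p hp; omega)]
        rw [if_neg (show ¬(0:Int) ≤ -1 by norm_num), List.nil_append]
        rw [if_neg h1]
        by_cases h3 : 0 ≤ i
        · rw [if_pos h3, pvNb_cons_close info h t i h2 hlt hi0]
          rw [if_pos h3]
        · rw [if_neg h3]
          rw [if_neg h3]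
      · have hrw : ∀ p ∈ t, (if p.2 = '(' then pvNb info (h :: t) p.1 else []) =
            (if p.2 = '(' then pvNb info t p.1 else []) := fun p hp => by
          rw [pvNb_cons_other info h t p.1 (by simp [h1, h2])]
        rw [List.flatMap_cons, List.flatMap_congr hrw]
        rw [pvAdjFrom, if_neg h1, if_neg h2]
        rw [← hih i (fun p hp => hi p (List.mem_cons_of_mem _ hp))]
        rw [if_neg h1, List.nil_append]
        by_cases h3 : 0 ≤ i
        · rw [if_pos h3, if_pos h3, pvNb_cons_other info h t i (by simp [h1, h2])]
        · rw [if_neg h3, if_neg h3]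

lemma pvMemDropTake (cs : List Char) (m n : Nat) (c : Char) :
    c ∈ (cs.drop m).take n ↔ ∃ k, ∃ _hk : k < cs.length, m ≤ k ∧ k < m + n ∧ cs[k] = c := by
  rw [List.mem_take_iff_getElem]
  constructor
  · rintro ⟨i, hi, he⟩
    have hlen : i < cs.length - m := by
      simp only [List.length_drop] at hi; omega
    refine ⟨m + i, by omega, by omega, by omega, ?_⟩
    rw [← List.getElem_drop]; exact he
  · rintro ⟨k, hk, hm, hkn, hc⟩
    refine ⟨k - m, by simp only [List.length_drop]; omega, ?_⟩
    have hp : m + (k - m) = k := by omega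
    simp only [List.getElem_drop, hp]
    exact hc

/-- The slice content condition of A equals the "no paren strictly between" condition. -/
lemma pvCond (info : String) (f r : Nat) (hfr : f < r) :
    ((PySem.Str.isIn ")" (PySem.Str.slice info (some ((f : Int) + 1)) (some (r : Int))) = false) ∧
     (PySem.Str.isIn "(" (PySem.Str.slice info (some ((f : Int) + 1)) (some (r : Int))) = false))
    ↔ pvNoB (pvEn info) (f : Int) (r : Int) := by
  have hdata : (PySem.Str.slice info (some ((f : Int) + 1)) (some (r : Int))).toList
      = (info.toList.drop (f+1)).take (r - (f+1)) := by
    rw [PySem.Str.toList_slice]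
    simp only [PySem.Chars.slice_eq_listSlice]
    rw [show ((f : Int) + 1) = ((f + 1 : Nat) : Int) by push_cast; ring]
    rw [PySem.List.slice_natCast]
  have hmem : ∀ c : Char, (PySem.Str.isIn (String.ofList [c]) (PySem.Str.slice info (some ((f : Int) + 1)) (some (r : Int))) = false)
      ↔ ∀ k, ∀ _hk : k < info.toList.length, f < k → k < r → info.toList[k] ≠ c := by
    intro c
    rw [Bool.eq_false_iff, ne_eq, PySem.Str.isIn_iff_infix, hdata]
    rw [show (String.ofList [c]).toList = [c] by simp, List.singleton_infix_iff]
    rw [pvMemDropTake]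
    constructor
    · intro hno k hk h1 h2 hc
      exact hno ⟨k, hk, by omega, by omega, hc⟩
    · rintro hall ⟨k, hk, hm, hkn, hc⟩
      exact hall k hk (by omega) (by omega) hc
  constructor
  · rintro ⟨hc, ho⟩ q hq hpar ⟨hfq, hqr⟩
    rw [pvEn, PySem.List.mem_enumerate_iff] at hq
    obtain ⟨k, hk, rfl⟩ := hq
    simp only [zero_add] at hfq hqr hpar
    have h1 : f < k := by exact_mod_cast hfq
    have h2 : k < r := by exact_mod_cast hqr
    rcases hpar with hp | hp
    · exact (hmem '(').mp (by exact ho) k hk h1 h2 hp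
    · exact (hmem ')').mp (by exact hc) k hk h1 h2 hp
  · intro hall
    constructor
    · show PySem.Str.isIn (String.ofList [')']) _ = false
      refine (hmem ')').mpr fun k hk h1 h2 hc => ?_
      exact hall ((0:Int) + k, info.toList[k])
        (by rw [pvEn]; exact (PySem.List.mem_enumerate_iff _ _ _).mpr ⟨k, hk, rfl⟩)
        (Or.inr hc) ⟨by push_cast; omega, by push_cast; omega⟩
    · show PySem.Str.isIn (String.ofList ['(']) _ = false
      refine (hmem '(').mpr fun k hk h1 h2 hc => ?_
      exact hall ((0:Int) + k, info.toList[k])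
        (by rw [pvEn]; exact (PySem.List.mem_enumerate_iff _ _ _).mpr ⟨k, hk, rfl⟩)
        (Or.inl hc) ⟨by push_cast; omega, by push_cast; omega⟩

lemma pvScan (info : String) :
    (PySem.List.enumerate info.toList 0).foldl
      (fun (st : List Int × List Int) (p : Int × Char) =>
        let st1 := if p.2 = '(' then (st.1 ++ [p.1], st.2) else st
        if p.2 = ')' then (st1.1, st1.2 ++ [p.1]) else st1)
      ([], []) = (pvFb info, pvRb info) := by
  have hstep : (fun (st : List Int × List Int) (p : Int × Char) =>
        let st1 := if p.2 = '(' then (st.1 ++ [p.1], st.2) else st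
        if p.2 = ')' then (st1.1, st1.2 ++ [p.1]) else st1)
      = fun st p => ((if p.2 = '(' then st.1 ++ [p.1] else st.1),
                     (if p.2 = ')' then st.2 ++ [p.1] else st.2)) := by
    funext st p
    by_cases h1 : p.2 = '('
    · have h2 : ¬ p.2 = ')' := by rw [h1]; decide
      simp [h1, h2]
    · by_cases h2 : p.2 = ')' <;> simp [h1, h2]
  rw [hstep]
  rw [PySem.List.foldl_prod_mk (f := fun l (p : Int × Char) => if p.2 = '(' then l ++ [p.1] else l)
      (g := fun l (p : Int × Char) => if p.2 = ')' then l ++ [p.1] else l)]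
  rw [Prod.mk.injEq]
  constructor
  · rw [PySem.List.foldl_append_ite (p := fun p : Int × Char => p.2 = '(') (f := Prod.fst)]
    rfl
  · rw [PySem.List.foldl_append_ite (p := fun p : Int × Char => p.2 = ')') (f := Prod.fst)]
    rfl

lemma pvA_shape (info : String) :
    GetMinClade info = (pvFb info).flatMap (fun f =>
      ((pvRb info).filter (fun r => decide (f < r ∧
          PySem.Str.isIn ")" (pvEmit info f r) = false ∧
          PySem.Str.isIn "(" (pvEmit info f r) = false))).map (fun r => pvEmit info f r)) := by
  unfold GetMinClade
  rw [pvScan]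
  have hinner : ∀ f : Int, (fun (acc2 : List String) (r : Int) =>
      if f < r then
        let data := PySem.Str.slice info (some (f + 1)) (some r)
        if PySem.Str.isIn ")" data = false ∧ PySem.Str.isIn "(" data = false
        then acc2 ++ [data] else acc2
      else acc2)
      = fun acc2 r => if (f < r ∧ PySem.Str.isIn ")" (pvEmit info f r) = false ∧
          PySem.Str.isIn "(" (pvEmit info f r) = false) then acc2 ++ [pvEmit info f r] else acc2 := by
    intro f; funext acc2 r
    by_cases h1 : f < r
    · by_cases h2 : PySem.Str.isIn ")" (pvEmit info f r) = false ∧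
          PySem.Str.isIn "(" (pvEmit info f r) = false <;> simp [h1, h2, pvEmit]
    · simp [h1]
  simp only [hinner]
  have houter : ∀ (acc : List String), (pvFb info).foldl (fun acc f =>
      (pvRb info).foldl (fun acc2 r => if (f < r ∧ PySem.Str.isIn ")" (pvEmit info f r) = false ∧
          PySem.Str.isIn "(" (pvEmit info f r) = false) then acc2 ++ [pvEmit info f r] else acc2) acc) acc
      = acc ++ (pvFb info).flatMap (fun f =>
      ((pvRb info).filter (fun r => decide (f < r ∧
          PySem.Str.isIn ")" (pvEmit info f r) = false ∧
          PySem.Str.isIn "(" (pvEmit info f r) = false))).map (fun r => pvEmit info f r)) := by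
    intro acc
    rw [show (fun acc f =>
      (pvRb info).foldl (fun acc2 r => if (f < r ∧ PySem.Str.isIn ")" (pvEmit info f r) = false ∧
          PySem.Str.isIn "(" (pvEmit info f r) = false) then acc2 ++ [pvEmit info f r] else acc2) acc)
      = fun (acc : List String) (f : Int) => acc ++
        ((pvRb info).filter (fun r => decide (f < r ∧
          PySem.Str.isIn ")" (pvEmit info f r) = false ∧
          PySem.Str.isIn "(" (pvEmit info f r) = false))).map (fun r => pvEmit info f r) by
      funext acc f
      rw [PySem.List.foldl_append_ite]]
    rw [PySem.List.foldl_append_eq_flatMap]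
  rw [houter, List.nil_append]

lemma pvA_final (info : String) :
    (pvFb info).flatMap (fun f =>
      ((pvRb info).filter (fun r => decide (f < r ∧
          PySem.Str.isIn ")" (pvEmit info f r) = false ∧
          PySem.Str.isIn "(" (pvEmit info f r) = false))).map (fun r => pvEmit info f r))
    = (pvEn info).flatMap (fun h => if h.2 = '(' then pvNb info (pvEn info) h.1 else []) := by
  rw [pvFb, List.flatMap_map, pvFlatMap_filter]
  apply List.flatMap_congr
  intro h hh
  by_cases hO : h.2 = '('
  · rw [if_pos (by simp [hO]), if_pos hO]
    rw [pvRb, List.filter_map, List.map_map, List.filter_filter]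
    rw [pvNb]
    obtain ⟨j, hj, rfl⟩ := (PySem.List.mem_enumerate_iff _ _ _).mp (by rw [pvEn] at hh; exact hh)
    have hfilter : (pvEn info).filter (fun a =>
        ((fun r => decide (((0:Int) + j, info.toList[j]).1 < r ∧
          PySem.Str.isIn ")" (pvEmit info ((0:Int) + j, info.toList[j]).1 r) = false ∧
          PySem.Str.isIn "(" (pvEmit info ((0:Int) + j, info.toList[j]).1 r) = false)) ∘ Prod.fst) a
          && decide (a.2 = ')'))
        = (pvEn info).filter (fun r => decide (r.2 = ')' ∧ ((0:Int) + j, info.toList[j]).1 < r.1 ∧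
            pvNoB (pvEn info) ((0:Int) + j, info.toList[j]).1 r.1)) := by
      apply List.filter_congr
      intro a ha
      obtain ⟨k, hk, rfl⟩ := (PySem.List.mem_enumerate_iff _ _ _).mp (by rw [pvEn] at ha; exact ha)
      simp only [Function.comp_apply, zero_add]
      by_cases hp : info.toList[k] = ')'
      · by_cases hjk : j < k
        · rw [← Bool.decide_and, decide_eq_decide]
          have hc := pvCond info j k hjk
          constructor
          · rintro ⟨⟨_, c1, c2⟩, _⟩
            exact ⟨hp, by exact_mod_cast hjk, hc.mp ⟨c1, c2⟩⟩
          · rintro ⟨_, _, hnob⟩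
            have := hc.mpr hnob
            exact ⟨⟨by exact_mod_cast hjk, this.1, this.2⟩, hp⟩
        · have h1 : ¬ ((j:Int) < (k:Int)) := by exact_mod_cast hjk
          simp [h1]
      · simp [hp]
    rw [hfilter]
    rfl
  · rw [if_neg (by simp [hO]), if_neg hO]



-- ===== VERDICT (by name: the statement is the Claim_ definition above) =====
theorem GetMinClade_spec : Claim_equal_GetMinClade := by
  intro info _
  unfold Spec_GetMinClade GetMinClade_alt
  rw [pvB_fold info (PySem.List.enumerate info.toList 0) [] (-1), List.nil_append]
  rw [pvA_shape, pvA_final]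
  have hnn : ∀ p ∈ pvEn info, 0 ≤ p.1 := by
    intro p hp
    obtain ⟨k, hk, rfl⟩ := (PySem.List.mem_enumerate_iff _ _ _).mp (by rw [pvEn] at hp; exact hp)
    simp
  have hG := pvG info (pvEn info)
      (by rw [pvEn]; exact PySem.List.pairwise_lt_enumerate _ _) hnn (-1)
      (fun p hp => by have := hnn p hp; omega)
  rw [if_neg (by norm_num : ¬(0:Int) ≤ -1), List.nil_append] at hG
  rw [hG, pvEn]
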